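-- pv_equiv track=rewrite | github.com/thofstrand/virtual-vampires-1 | backend_scripts/tense_converter.py | to_past
-- ===== SOURCE A (Python) =====
-- def to_past(verb, exc):
--     if len(verb.split(" ")) > 1:
--         return to_past(verb.split(" ")[0], exc) + " " + " ".join(verb.split(" ")[1:])
--     if verb.startswith("be "):
--         return verb.replace("be ", "was ")
--     if verb.startswith("put on"):
--         return verb
--
--     if verb in exc:
--         return exc[verb]
--     if verb.endswith("e"):
--         return verb + "d"
--     elif verb.endswith("y"):
--         return verb[:-1] + "ied"
--     elif verb.endswith("d"):
--         return verb[:-1] + "t"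
--     else:
--         return verb+"ed"
-- ===== SOURCE B (Python) =====
-- def to_past(verb, exc):
--     words = verb.split(" ")
--     head, rest = words[0], words[1:]
--     if head in exc:
--         past = exc[head]
--     elif head.endswith("e"):
--         past = head + "d"
--     elif head.endswith("y"):
--         past = head[:-1] + "ied"
--     elif head.endswith("d"):
--         past = head[:-1] + "t"
--     else:
--         past = head + "ed"
--     return past + " " + " ".join(rest) if rest else past
-- ===== Notes on version B (the rewrite author's own statement) =====
-- stated objective: simpler
-- what changed: Replaced the tail recursion on the first word and the dead 'be '/'put on' guards by a flat single pass: split once, conjugate the head with the ordered suffix rules, rejoin the rest.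
import Mathlib
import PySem

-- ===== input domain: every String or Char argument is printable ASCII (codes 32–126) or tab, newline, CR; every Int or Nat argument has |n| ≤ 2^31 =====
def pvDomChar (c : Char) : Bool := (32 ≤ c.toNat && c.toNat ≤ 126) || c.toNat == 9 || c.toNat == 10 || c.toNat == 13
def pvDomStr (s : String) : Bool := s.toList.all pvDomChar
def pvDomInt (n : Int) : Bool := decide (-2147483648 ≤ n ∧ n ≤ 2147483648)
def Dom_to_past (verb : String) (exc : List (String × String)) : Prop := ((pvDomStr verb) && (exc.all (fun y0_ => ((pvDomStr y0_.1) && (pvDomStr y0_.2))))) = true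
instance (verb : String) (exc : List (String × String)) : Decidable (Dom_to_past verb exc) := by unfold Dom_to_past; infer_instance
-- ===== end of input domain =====

-- B replaces A's tail recursion on the first word (and the unreachable 'be '/'put on'
-- guards) by a flat single pass: split once, conjugate the head, rejoin the rest.

-- ===== PORT A =====

-- Specification function for `s.split(" ")` used to justify termination of the
-- recursive port of A (the port itself calls the PySem primitive; these helpers
-- only feed the `decreasing_by` proof, cited by name there).
def pvSplit1 : List Char → List (List Char)
  | [] => [[]]
  | c :: rest =>
    if c = ' ' then [] :: pvSplit1 rest
    else
      match pvSplit1 rest with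
      | [] => [[c]]
      | x :: xs => (c :: x) :: xs

theorem pvSplit1_ne_nil (l : List Char) : pvSplit1 l ≠ [] := by
  induction l with
  | nil => simp [pvSplit1]
  | cons c rest ih =>
    simp only [pvSplit1]
    split
    · simp
    · cases h : pvSplit1 rest <;> simp

theorem pvSplitOn_go_eq (fuel : Nat) (l cur : List Char) (acc : List (List Char))
    (hf : l.length < fuel) :
    PySem.Chars.splitOn.go [' '] fuel l cur acc =
      acc.reverse ++
        (match pvSplit1 l with
         | [] => [cur.reverse]
         | x :: xs => (cur.reverse ++ x) :: xs) := by
  induction fuel generalizing l cur acc with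
  | zero => omega
  | succ fuel ih =>
    cases l with
    | nil =>
      simp [PySem.Chars.splitOn.go, pvSplit1]
    | cons c rest =>
      by_cases hc : c = ' '
      · subst hc
        have hpre : [' '].isPrefixOf (' ' :: rest) = true := by simp [List.isPrefixOf]
        simp only [PySem.Chars.splitOn.go, hpre, if_pos]
        have := ih rest [] (cur.reverse :: acc) (by simpa using Nat.lt_of_succ_lt_succ hf)
        simp only [List.length_cons, List.length_nil, List.drop_succ_cons, List.drop_zero] at this ⊢
        rw [this]
        have hne := pvSplit1_ne_nil rest
        cases hs : pvSplit1 rest with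
        | nil => exact absurd hs hne
        | cons x xs => simp [pvSplit1, hs]
      · have hpre : [' '].isPrefixOf (c :: rest) = false := by
          simp [List.isPrefixOf, BEq.beq]
          intro h; exact absurd h.symm hc
        simp only [PySem.Chars.splitOn.go, hpre]
        rw [if_neg (by simp)]
        have := ih rest (c :: cur) acc (by simpa using Nat.lt_of_succ_lt_succ hf)
        rw [this]
        have hne := pvSplit1_ne_nil rest
        cases hs : pvSplit1 rest with
        | nil => exact absurd hs hne
        | cons x xs => simp [pvSplit1, hs, hc]

theorem pvSplitOn_space (l : List Char) :
    PySem.Chars.splitOn l [' '] = pvSplit1 l := by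
  unfold PySem.Chars.splitOn
  rw [pvSplitOn_go_eq (l.length + 1) l [] [] (by omega)]
  have hne := pvSplit1_ne_nil l
  cases hs : pvSplit1 l with
  | nil => exact absurd hs hne
  | cons x xs => simp

theorem pvStrSplit_space (s : String) :
    (PySem.Str.split? s " ").getD [] = (pvSplit1 s.toList).map String.ofList := by
  simp [PySem.Str.split?, PySem.Chars.split?, pvSplitOn_space]

theorem pvSplit1_head_no_space (l : List Char) (a : List Char) (rest : List (List Char))
    (h : pvSplit1 l = a :: rest) : ' ' ∉ a := by
  induction l generalizing a rest with
  | nil => simp [pvSplit1] at h; simp [h.1]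
  | cons c r ih =>
    simp only [pvSplit1] at h
    by_cases hc : c = ' '
    · rw [if_pos hc] at h
      obtain ⟨h1, _⟩ := List.cons.injEq _ _ _ _ ▸ h
      simp [← h1]
    · rw [if_neg hc] at h
      cases hs : pvSplit1 r with
      | nil => exact absurd hs (pvSplit1_ne_nil r)
      | cons x xs =>
        rw [hs] at h
        obtain ⟨h1, _⟩ := List.cons.injEq _ _ _ _ ▸ h
        have hx := ih x xs hs
        rw [← h1]
        simp [hx]
        intro hcc; exact hc hcc.symm

theorem pvSplit1_no_space (l : List Char) (h : ' ' ∉ l) : pvSplit1 l = [l] := by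
  induction l with
  | nil => simp [pvSplit1]
  | cons c r ih =>
    have hc : ¬ c = ' ' := by intro hc; exact h (by simp [hc])
    have hr : ' ' ∉ r := fun hm => h (by simp [hm])
    simp [pvSplit1, hc, ih hr]

-- cited by `decreasing_by` in the port of A
theorem pv_split_head_len (s : String)
    (h : 1 < ((PySem.Str.split? s " ").getD []).length) :
    ((PySem.Str.split? (((PySem.Str.split? s " ").getD []).headD "") " ").getD []).length <
      ((PySem.Str.split? s " ").getD []).length := by
  rw [pvStrSplit_space] at h ⊢
  rw [pvStrSplit_space]
  cases hs : pvSplit1 s.toList with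
  | nil => exact absurd hs (pvSplit1_ne_nil _)
  | cons a rest =>
    have hna : ' ' ∉ a := pvSplit1_head_no_space _ a rest hs
    simp only [List.map_cons, List.headD_cons]
    have : (String.ofList a).toList = a := by simp
    rw [this, pvSplit1_no_space a hna]
    simp only [List.map_cons, List.map_nil, List.length_cons]
    rw [hs] at h
    simpa using h

def to_past (verb : String) (exc : List (String × String)) : String :=
  if h : 1 < ((PySem.Str.split? verb " ").getD []).length then
    to_past (((PySem.Str.split? verb " ").getD []).headD "") exc ++ " " ++
      PySem.Str.join " " (PySem.List.slice ((PySem.Str.split? verb " ").getD []) (some 1) none)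
  else if PySem.Str.startswith verb "be " then
    PySem.Str.replace verb "be " "was "
  else if PySem.Str.startswith verb "put on" then
    verb
  else if (PySem.Dict.mk exc).contains verb then
    ((PySem.Dict.mk exc).get? verb).getD ""
  else if PySem.Str.endswith verb "e" then
    verb ++ "d"
  else if PySem.Str.endswith verb "y" then
    PySem.Str.slice verb none (some (-1)) ++ "ied"
  else if PySem.Str.endswith verb "d" then
    PySem.Str.slice verb none (some (-1)) ++ "t"
  else
    verb ++ "ed"
termination_by ((PySem.Str.split? verb " ").getD []).length
decreasing_by exact pv_split_head_len verb h

-- ===== PORT B =====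

def pvConj (head : String) (exc : List (String × String)) : String :=
  if (PySem.Dict.mk exc).contains head then
    ((PySem.Dict.mk exc).get? head).getD ""
  else if PySem.Str.endswith head "e" then
    head ++ "d"
  else if PySem.Str.endswith head "y" then
    PySem.Str.slice head none (some (-1)) ++ "ied"
  else if PySem.Str.endswith head "d" then
    PySem.Str.slice head none (some (-1)) ++ "t"
  else
    head ++ "ed"

def to_past_alt (verb : String) (exc : List (String × String)) : String :=
  let words := (PySem.Str.split? verb " ").getD []
  let head := words.headD ""
  let rest := PySem.List.slice words (some 1) none
  let past := pvConj head exc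
  if rest.isEmpty then past else past ++ " " ++ PySem.Str.join " " rest

-- ===== PRECONDITION & SPEC =====
def Spec_to_past (verb : String) (exc : List (String × String)) (out : String) : Prop := out = to_past_alt verb exc
instance (verb : String) (exc : List (String × String)) (out : String) : Decidable (Spec_to_past verb exc out) := by unfold Spec_to_past; infer_instance

-- ===== CLAIM (what is proved, stated in full; the proofs are below) =====
def Claim_equal_to_past : Prop := ∀ (verb : String) (exc : List (String × String)), Dom_to_past verb exc → Spec_to_past verb exc (to_past verb exc)

-- ===== LEMMAS AND PROOFS =====

theorem pvSplit1_singleton (l a : List Char) (h : pvSplit1 l = [a]) :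
    a = l ∧ ' ' ∉ l := by
  induction l generalizing a with
  | nil => simp [pvSplit1] at h; simp [h]
  | cons c r ih =>
    simp only [pvSplit1] at h
    by_cases hc : c = ' '
    · rw [if_pos hc] at h
      have := pvSplit1_ne_nil r
      simp at h
      exact absurd h.2 this
    · rw [if_neg hc] at h
      cases hs : pvSplit1 r with
      | nil => exact absurd hs (pvSplit1_ne_nil r)
      | cons x xs =>
        rw [hs] at h
        simp at h
        obtain ⟨h1, h2⟩ := h
        subst h2
        obtain ⟨hx, hr⟩ := ih x hs
        subst hx
        constructor
        · rw [h1]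
        · simp [hr]; intro hcc; exact hc hcc.symm

-- a prefix containing a space cannot be a prefix of a space-free string
theorem pv_startswith_false (s p : String) (hp : ' ' ∈ p.toList) (hs : ' ' ∉ s.toList) :
    PySem.Str.startswith s p = false := by
  rw [PySem.Str.startswith]
  by_contra hh
  have : PySem.Chars.startswith s.toList p.toList = true := by
    cases h : PySem.Chars.startswith s.toList p.toList
    · exact absurd h hh
    · rfl
  rw [PySem.Chars.startswith_iff] at this
  exact hs (this.mem hp)

-- on a space-free verb, A takes no recursive step and no guard fires: it conjugates
theorem to_past_no_space (verb : String) (exc : List (String × String))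
    (h : ' ' ∉ verb.toList) : to_past verb exc = pvConj verb exc := by
  rw [to_past]
  have hsplit : (PySem.Str.split? verb " ").getD [] = [verb] := by
    rw [pvStrSplit_space, pvSplit1_no_space _ h]
    simp
  rw [dif_neg (by rw [hsplit]; simp)]
  rw [pv_startswith_false verb "be " (by decide) h,
      pv_startswith_false verb "put on" (by decide) h]
  rfl

theorem to_past_eq_alt (verb : String) (exc : List (String × String)) :
    to_past verb exc = to_past_alt verb exc := by
  have hsplit := pvStrSplit_space verb
  cases hs : pvSplit1 verb.toList with
  | nil => exact absurd hs (pvSplit1_ne_nil _)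
  | cons a rest =>
    have hna : ' ' ∉ a := pvSplit1_head_no_space _ a rest hs
    cases rest with
    | nil =>
      -- one word: verb itself is space-free
      obtain ⟨hav, hnv⟩ := pvSplit1_singleton verb.toList a hs
      rw [to_past_no_space verb exc hnv]
      rw [to_past_alt]
      simp only [hsplit, hs]
      subst hav
      simp [PySem.List.slice_from_one, String.ofList_toList]
    | cons b rs =>
      -- at least two words: A recurses once on the space-free head
      rw [to_past]
      have hlen : 1 < ((PySem.Str.split? verb " ").getD []).length := by
        rw [hsplit, hs]; simp
      rw [dif_pos hlen]
      rw [to_past_alt]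
      simp only [hsplit, hs, List.map_cons, List.headD_cons]
      have hhead : (String.ofList a).toList = a := by simp
      rw [to_past_no_space (String.ofList a) exc (by rw [hhead]; exact hna)]
      simp [PySem.List.slice_from_one]

-- ===== VERDICT (by name: the statement is the Claim_ definition above) =====
theorem to_past_spec : Claim_equal_to_past := by
  intro verb exc _
  unfold Spec_to_past
  exact to_past_eq_alt verb exc
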